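-- pv_equiv track=rewrite | github.com/joshuathomascarter/CacheSimlab | cache sim/4-way cache/python/analysis/working_set.py | calculate_working_set
-- ===== SOURCE A (Python) =====
-- from collections import deque
-- from typing import List, Tuple, Optional
--
-- def calculate_working_set(trace: List[int], window_size: int,
--                           block_size: int = 64) -> List[int]:
--     """
--     Calculate the working set size over time using a sliding window.
--
--     Args:
--         trace: List of memory addresses
--         window_size: Number of accesses in the sliding window
--         block_size: Cache block size (addresses in same block count as one)
--
--     Returns:
--         List of working set sizes (one per position in trace)
--     """
--     if len(trace) < window_size:
--         return [len(set(addr // block_size for addr in trace))]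
--
--     # Convert to block addresses
--     block_trace = [addr // block_size for addr in trace]
--
--     working_set_sizes = []
--
--     # Initialize window with first window_size elements
--     window = deque(block_trace[:window_size])
--     block_count = {}  # block -> count in window
--
--     for block in window:
--         block_count[block] = block_count.get(block, 0) + 1
--
--     working_set_sizes.append(len(block_count))
--
--     # Slide window through trace
--     for i in range(window_size, len(block_trace)):
--         # Remove oldest element
--         old_block = window.popleft()
--         block_count[old_block] -= 1
--         if block_count[old_block] == 0:
--             del block_count[old_block]
--
--         # Add new element
--         new_block = block_trace[i]
--         window.append(new_block)
--         block_count[new_block] = block_count.get(new_block, 0) + 1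
--
--         working_set_sizes.append(len(block_count))
--
--     return working_set_sizes
-- ===== SOURCE B (Python) =====
-- def calculate_working_set(trace, window_size, block_size=64):
--     """Sliding-window working-set sizes: distinct block count per window,
--     recomputed from scratch per position instead of incremental bookkeeping."""
--     block_trace = [addr // block_size for addr in trace]
--     if len(trace) < window_size:
--         return [len(set(block_trace))]
--     return [len(set(block_trace[i:i + window_size]))
--             for i in range(len(block_trace) - window_size + 1)]
-- ===== Notes on version B (the rewrite author's own statement) =====
-- stated objective: simpler
-- what changed: B drops A's deque + incremental count-dict bookkeeping and simply recounts the distinct blocks of each window slice with a comprehension over window start positions.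
-- outside the precondition, e.g. on calculate_working_set([10, 70], -1, 64): A returns [1, 1, 1, 1], B returns [1, 0, 0, 0]
import Mathlib
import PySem

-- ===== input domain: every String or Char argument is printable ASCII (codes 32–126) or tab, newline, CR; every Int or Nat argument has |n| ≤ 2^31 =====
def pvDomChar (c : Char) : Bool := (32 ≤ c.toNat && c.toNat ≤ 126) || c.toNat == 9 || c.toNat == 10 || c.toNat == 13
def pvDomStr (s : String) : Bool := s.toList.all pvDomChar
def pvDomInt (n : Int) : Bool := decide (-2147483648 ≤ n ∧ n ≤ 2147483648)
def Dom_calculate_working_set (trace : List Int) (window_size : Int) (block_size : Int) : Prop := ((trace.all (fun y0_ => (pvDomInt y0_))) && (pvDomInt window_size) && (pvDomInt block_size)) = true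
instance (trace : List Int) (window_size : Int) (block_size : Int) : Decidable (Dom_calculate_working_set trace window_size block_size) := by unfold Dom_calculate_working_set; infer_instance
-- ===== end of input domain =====

-- B replaces A's incremental deque + count-dict sliding window by a direct per-window
-- recount (distinct blocks of each slice); objective: simpler. Return-value equivalence
-- proved on Pre_ (positive window, nonzero block size).

-- ===== PORT A =====
-- Loop body of A's sliding-window for-loop; state = (window, block_count, working_set_sizes).
-- Under Pre_ the window is never empty at popleft (headD's default is never read), old_block
-- is always a key of block_count, and block_trace[i] is always in range (pyGetD's default 0
-- is never read); this matches Python exactly on every input admitted by Pre_.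
def cwsStep (block_trace : List Int) (st : List Int × PySem.Dict Int Int × List Int) (i : Int) :
    List Int × PySem.Dict Int Int × List Int :=
  let old_block := st.1.headD 0                                  -- window.popleft()
  let window' := st.1.tail
  let d1 := st.2.1.insert old_block (st.2.1.getD old_block 0 - 1)  -- block_count[old_block] -= 1
  let d2 := if d1.getD old_block 0 == 0 then d1.erase old_block else d1
  let new_block := PySem.List.pyGetD block_trace i 0             -- block_trace[i]
  let d3 := d2.insert new_block (d2.getD new_block 0 + 1)
  (window' ++ [new_block], d3, st.2.2 ++ [(d3.size : Int)])

def calculate_working_set (trace : List Int) (window_size : Int) (block_size : Int) : List Int :=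
  if (trace.length : Int) < window_size then
    [((PySem.Set.ofList (trace.map (fun addr => PySem.Int.floordiv addr block_size))).length : Int)]
  else
    let block_trace := trace.map (fun addr => PySem.Int.floordiv addr block_size)
    let window := PySem.List.slice block_trace none (some window_size)
    let block_count := window.foldl (fun d b => d.insert b (d.getD b 0 + 1)) PySem.Dict.empty
    let st := (PySem.List.pyRange window_size (block_trace.length : Int) 1).foldl
      (cwsStep block_trace) (window, block_count, [(block_count.size : Int)])
    st.2.2

-- ===== PORT B =====
def calculate_working_set_alt (trace : List Int) (window_size : Int) (block_size : Int) : List Int :=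
  let block_trace := trace.map (fun addr => PySem.Int.floordiv addr block_size)
  if (trace.length : Int) < window_size then
    [((PySem.Set.ofList block_trace).length : Int)]
  else
    (PySem.List.pyRange 0 ((block_trace.length : Int) - window_size + 1) 1).map
      (fun i => ((PySem.Set.ofList (PySem.List.slice block_trace (some i) (some (i + window_size)))).length : Int))

-- ===== PRECONDITION & SPEC =====
-- Pre_ excludes block_size = 0, where A raises ZeroDivisionError, and non-positive
-- window_size (except the vacuous empty-trace/window_size = 0 corner, which is kept):
-- there A either raises IndexError popping an empty deque or, when the trace is longer
-- than |window_size|, returns values produced by Python's negative-slice/negative-index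
-- wraparound — an artefact outside the function's natural domain of positive windows.
def Pre_calculate_working_set (trace : List Int) (window_size : Int) (block_size : Int) : Prop :=
  block_size ≠ 0 ∧ (0 < window_size ∨ (trace = [] ∧ window_size = 0))
instance (trace : List Int) (window_size : Int) (block_size : Int) : Decidable (Pre_calculate_working_set trace window_size block_size) := by unfold Pre_calculate_working_set; infer_instance

def pvWitness_calculate_working_set : List Int × Int × Int := ([0, 1, 130, 131, 0], 2, 64)

def Spec_calculate_working_set (trace : List Int) (window_size : Int) (block_size : Int) (out : List Int) : Prop := out = calculate_working_set_alt trace window_size block_size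
instance (trace : List Int) (window_size : Int) (block_size : Int) (out : List Int) : Decidable (Spec_calculate_working_set trace window_size block_size out) := by unfold Spec_calculate_working_set; infer_instance

-- ===== CLAIM (what is proved, stated in full; the proofs are below) =====
def Claim_equal_calculate_working_set : Prop := ∀ (trace : List Int) (window_size : Int) (block_size : Int), Dom_calculate_working_set trace window_size block_size → Pre_calculate_working_set trace window_size block_size → Spec_calculate_working_set trace window_size block_size (calculate_working_set trace window_size block_size)
-- ===== LEMMAS AND PROOFS =====

-- Dict.erase facts (erase is items.filter; PySem ships no erase lemmas, so these are ours)
theorem dict_getD_erase (d : PySem.Dict Int Int) (k b v : Int) :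
    (d.erase k).getD b v = if b = k then v else d.getD b v := by
  rcases d with ⟨items⟩
  induction items with
  | nil => simp [PySem.Dict.erase, PySem.Dict.getD, PySem.Dict.get?]
  | cons p rest ih =>
    simp only [PySem.Dict.erase, PySem.Dict.getD, PySem.Dict.get?, List.filter_cons] at *
    by_cases hpk : p.1 = k <;> by_cases hpb : p.1 = b <;> simp_all

theorem dict_mem_keys_erase (d : PySem.Dict Int Int) (k b : Int) :
    b ∈ (d.erase k).keys ↔ b ∈ d.keys ∧ b ≠ k := by
  rcases d with ⟨items⟩
  simp only [PySem.Dict.erase, PySem.Dict.keys, List.mem_map, List.mem_filter]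
  constructor
  · rintro ⟨p, ⟨hp, hne⟩, rfl⟩; simp at hne; exact ⟨⟨p, hp, rfl⟩, hne⟩
  · rintro ⟨⟨p, hp, rfl⟩, hne⟩; exact ⟨p, ⟨hp, by simpa using hne⟩, rfl⟩

theorem dict_nodup_keys_erase (d : PySem.Dict Int Int) (k : Int) (h : d.keys.Nodup) :
    (d.erase k).keys.Nodup := by
  rcases d with ⟨items⟩
  simp only [PySem.Dict.erase, PySem.Dict.keys] at *
  exact h.sublist (List.Sublist.map _ List.filter_sublist)

-- size of a dict whose keys enumerate exactly the members of win = len(set(win))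
theorem size_of_inv (d : PySem.Dict Int Int) (win : List Int)
    (hnd : d.keys.Nodup) (hmem : ∀ b, b ∈ d.keys ↔ b ∈ win) :
    d.size = (PySem.Set.ofList win).length := by
  have hperm : d.keys.Perm (PySem.Set.ofList win) := by
    rw [List.perm_ext_iff_of_nodup hnd (PySem.Set.nodup_ofList win)]
    intro a; rw [hmem, PySem.Set.mem_ofList]
  have : d.keys.length = (PySem.Set.ofList win).length := hperm.length_eq
  simpa [PySem.Dict.keys, PySem.Dict.size] using this

-- one dict update step of A's loop preserves the counter invariant, window h::t → t++[x]
theorem dict_step (d : PySem.Dict Int Int) (h x : Int) (t : List Int)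
    (hnd : d.keys.Nodup)
    (hcnt : ∀ b, d.getD b 0 = ((h :: t).count b : Int))
    (hmem : ∀ b, b ∈ d.keys ↔ b ∈ h :: t) :
    let d1 := d.insert h (d.getD h 0 - 1)
    let d2 := if d1.getD h 0 == 0 then d1.erase h else d1
    let d3 := d2.insert x (d2.getD x 0 + 1)
    d3.keys.Nodup ∧ (∀ b, d3.getD b 0 = ((t ++ [x]).count b : Int)) ∧
      (∀ b, b ∈ d3.keys ↔ b ∈ t ++ [x]) := by
  intro d1 d2 d3
  have hd1getD : ∀ b, d1.getD b 0 = if b = h then ((h :: t).count h : Int) - 1 else ((h :: t).count b : Int) := by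
    intro b
    rw [show d1 = d.insert h (d.getD h 0 - 1) from rfl, PySem.Dict.getD_insert]
    split_ifs with hb <;> simp [hcnt]
  have hcount_cons : ((h :: t).count h) = t.count h + 1 := by simp
  have hd1h : d1.getD h 0 = (t.count h : Int) := by
    rw [hd1getD h]; simp [hcount_cons]
  have hd1mem : ∀ b, b ∈ d1.keys ↔ b ∈ h :: t := by
    intro b
    rw [show d1 = d.insert h (d.getD h 0 - 1) from rfl, PySem.Dict.mem_keys_insert, hmem,
      List.mem_cons]
    tauto
  have hd1nd : d1.keys.Nodup := PySem.Dict.nodup_keys_insert d h _ hnd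
  -- facts about d2
  have hd2 : d2.keys.Nodup ∧ (∀ b, d2.getD b 0 = (t.count b : Int)) ∧ (∀ b, b ∈ d2.keys ↔ b ∈ t) := by
    by_cases hz : t.count h = 0
    · have hnot : h ∉ t := List.count_eq_zero.mp hz
      have hcond : (d1.getD h 0 == 0) = true := by rw [hd1h, hz]; simp
      have hd2e : d2 = d1.erase h := by simp only [d2, hcond]; simp
      refine ⟨?_, ?_, ?_⟩
      · rw [hd2e]; exact dict_nodup_keys_erase _ _ hd1nd
      · intro b; rw [hd2e, dict_getD_erase]
        split_ifs with hb
        · subst hb; simp [hz]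
        · rw [hd1getD b]; simp [hb, Ne.symm hb]
      · intro b; rw [hd2e, dict_mem_keys_erase, hd1mem, List.mem_cons]
        constructor
        · rintro ⟨rfl | hb, hne⟩
          · exact absurd rfl hne
          · exact hb
        · intro hb; exact ⟨Or.inr hb, fun hbh => hnot (hbh ▸ hb)⟩
    · have hcond : (d1.getD h 0 == 0) = false := by
        rw [hd1h]; simp; exact_mod_cast hz
      have hd2e : d2 = d1 := by simp only [d2, hcond]; simp
      have hht : h ∈ t := List.count_pos_iff.mp (Nat.pos_of_ne_zero hz)
      refine ⟨hd2e ▸ hd1nd, ?_, ?_⟩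
      · intro b; rw [hd2e, hd1getD b]
        split_ifs with hb
        · subst hb; simp [hcount_cons]
        · simp [Ne.symm hb]
      · intro b; rw [hd2e, hd1mem, List.mem_cons]
        constructor
        · rintro (rfl | hb); exacts [hht, hb]
        · exact Or.inr
  obtain ⟨hd2nd, hd2cnt, hd2mem⟩ := hd2
  refine ⟨PySem.Dict.nodup_keys_insert _ _ _ hd2nd, ?_, ?_⟩
  · intro b
    rw [show d3 = d2.insert x (d2.getD x 0 + 1) from rfl, PySem.Dict.getD_insert]
    split_ifs with hb
    · subst hb; rw [hd2cnt]; simp [List.count_append]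
    · rw [hd2cnt]; simp [List.count_append, Ne.symm hb]
  · intro b
    rw [show d3 = d2.insert x (d2.getD x 0 + 1) from rfl, PySem.Dict.mem_keys_insert, hd2mem]
    simp [or_comm]

-- list window algebra
theorem take_drop_cons (bt : List Int) (j w : Nat) (hj : j < bt.length) (hw : 1 ≤ w) :
    (bt.drop j).take w = bt.getD j 0 :: (bt.drop (j + 1)).take (w - 1) := by
  obtain ⟨w', rfl⟩ : ∃ w', w = w' + 1 := ⟨w - 1, by omega⟩
  rw [List.drop_eq_getElem_cons hj, List.take_succ_cons]
  simp [List.getD, List.getElem?_eq_getElem hj]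

theorem take_append_getD (bt : List Int) (j k : Nat) (h : j + k < bt.length) :
    (bt.drop j).take k ++ [bt.getD (j + k) 0] = (bt.drop j).take (k + 1) := by
  rw [List.take_add_one]
  congr 1
  have hk : k < (bt.drop j).length := by simp; omega
  rw [List.getElem?_drop]
  simp [List.getD, List.getElem?_eq_getElem h]

-- A's sliding loop, related to per-window distinct counts
theorem cws_loop (bt : List Int) (w : Nat) (hw : 1 ≤ w) :
    ∀ (k a : Nat), bt.length - a = k → w ≤ a → a ≤ bt.length →
    ∀ (d : PySem.Dict Int Int) (out : List Int),
    d.keys.Nodup → (∀ b, d.getD b 0 = (((bt.drop (a - w)).take w).count b : Int)) →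
    (∀ b, b ∈ d.keys ↔ b ∈ (bt.drop (a - w)).take w) →
    ((PySem.List.pyRange (a : Int) (bt.length : Int) 1).foldl (cwsStep bt)
        ((bt.drop (a - w)).take w, d, out)).2.2
      = out ++ (PySem.List.pyRange (a : Int) (bt.length : Int) 1).map
          (fun i => ((PySem.Set.ofList ((bt.drop (i.toNat + 1 - w)).take w)).length : Int)) := by
  intro k
  induction k with
  | zero =>
    intro a hk hwa han d out _ _ _
    have : (bt.length : Int) ≤ (a : Int) := by exact_mod_cast Nat.le_of_sub_eq_zero hk
    rw [PySem.List.pyRange_one_eq_nil this]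
    simp
  | succ k ih =>
    intro a hk hwa han d out hnd hcnt hmem
    have haln : a < bt.length := by omega
    have hcast : ((a : Int)) < (bt.length : Int) := by exact_mod_cast haln
    rw [PySem.List.pyRange_one_cons hcast]
    simp only [List.foldl_cons, List.map_cons]
    have hwin : (bt.drop (a - w)).take w = bt.getD (a - w) 0 :: (bt.drop (a - w + 1)).take (w - 1) :=
      take_drop_cons bt (a - w) w (by omega) hw
    set h := bt.getD (a - w) 0 with hh
    set t := (bt.drop (a - w + 1)).take (w - 1) with ht
    have hx : PySem.List.pyGetD bt ((a : Nat) : Int) 0 = bt.getD a 0 := by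
      simp [PySem.List.pyGetD_natCast]
    set x := bt.getD a 0 with hxdef
    obtain ⟨hnd3, hcnt3, hmem3⟩ := dict_step d h x t hnd
      (fun b => by rw [hcnt b, hwin]) (fun b => by rw [hmem b, hwin])
    set d1 := d.insert h (d.getD h 0 - 1) with hd1
    set d2 := if d1.getD h 0 == 0 then d1.erase h else d1 with hd2def
    set d3 := d2.insert x (d2.getD x 0 + 1) with hd3
    have hwin' : t ++ [x] = (bt.drop (a + 1 - w)).take w := by
      have hj := take_append_getD bt (a - w + 1) (w - 1) (by omega)
      rw [show a - w + 1 + (w - 1) = a by omega] at hj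
      rw [ht, hxdef, hj, show w - 1 + 1 = w by omega, show a + 1 - w = a - w + 1 by omega]
    have hsize : (d3.size : Int) = ((PySem.Set.ofList ((bt.drop (a + 1 - w)).take w)).length : Int) := by
      rw [size_of_inv d3 (t ++ [x]) hnd3 hmem3, hwin']
    have hstep : cwsStep bt ((bt.drop (a - w)).take w, d, out) ((a : Nat) : Int) =
        ((bt.drop (a + 1 - w)).take w, d3, out ++ [(d3.size : Int)]) := by
      rw [hwin, ← hwin']
      simp only [cwsStep, List.headD_cons, List.tail_cons, hx]
      rw [← hd1, ← hd2def, ← hd3]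
    rw [hstep]
    rw [hwin'] at hcnt3 hmem3
    have hca : ((a : Int)) + 1 = (((a + 1 : Nat)) : Int) := by push_cast; ring
    rw [hca, ih (a + 1) (by omega) (by omega) (by omega) d3 (out ++ [(d3.size : Int)]) hnd3 hcnt3 hmem3]
    rw [hsize]
    simp [List.append_assoc]

-- reindexing: B's window list = A's first window :: A's loop windows
theorem reindex (bt : List Int) (w : Nat) (hw : 1 ≤ w) (hwn : w ≤ bt.length) :
    (PySem.List.pyRange 0 ((bt.length : Int) - (w : Int) + 1) 1).map
        (fun i => ((PySem.Set.ofList (PySem.List.slice bt (some i) (some (i + (w : Int))))).length : Int))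
      = ((PySem.Set.ofList (bt.take w)).length : Int) ::
        (PySem.List.pyRange (w : Int) (bt.length : Int) 1).map
          (fun i => ((PySem.Set.ofList ((bt.drop (i.toNat + 1 - w)).take w)).length : Int)) := by
  have hwn' : ((w : Int)) ≤ (bt.length : Int) := by exact_mod_cast hwn
  have h1 : (0 : Int) < (bt.length : Int) - (w : Int) + 1 := by omega
  rw [PySem.List.pyRange_one_cons h1, List.map_cons]
  congr 1
  · rw [show ((0 : Int) + (w : Int)) = ((w : Int)) by ring]
    rw [PySem.List.slice_zero_start, PySem.List.slice_to_natCast]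
  · rw [PySem.List.pyRange_one, PySem.List.pyRange_one, List.map_map, List.map_map]
    norm_num
    intro a _
    have e1 : (1 : Int) + (a : Int) = (((1 + a : Nat)) : Int) := by push_cast; ring
    rw [e1, PySem.List.slice_natCast_add]
    have e2 : (((w : Int)) + (a : Int)).toNat = w + a := by omega
    rw [e2, show w + a + 1 - w = 1 + a by omega]

theorem calculate_working_set_spec : Claim_equal_calculate_working_set := by
  intro trace window_size block_size _ hpre
  unfold Spec_calculate_working_set
  obtain ⟨hbs, hcase⟩ := hpre
  rcases hcase with hws | ⟨htr, hws0⟩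
  · by_cases hlt : (trace.length : Int) < window_size
    · simp [calculate_working_set, calculate_working_set_alt, hlt]
    · -- main case: 0 < window_size ≤ len(trace)
      obtain ⟨w, rfl⟩ : ∃ w : Nat, window_size = (w : Int) :=
        ⟨window_size.toNat, (Int.toNat_of_nonneg (le_of_lt hws)).symm⟩
      have hw1 : 1 ≤ w := by exact_mod_cast hws
      set bt := trace.map (fun addr => PySem.Int.floordiv addr block_size) with hbt
      have hlen : bt.length = trace.length := by simp [hbt]
      have hwn : w ≤ bt.length := by rw [hlen]; exact_mod_cast not_lt.mp hlt
      simp only [calculate_working_set, calculate_working_set_alt, if_neg hlt]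
      rw [← hbt]
      rw [PySem.List.slice_to_natCast]
      rw [PySem.Dict.foldl_insert_getD_add_one_eq_counter]
      have hwin0 : (bt.drop (w - w)).take w = bt.take w := by simp
      have hcnt0 : ∀ b : Int, (PySem.Dict.counter (bt.take w)).getD b 0 = (((bt.drop (w - w)).take w).count b : Int) := by
        intro b; rw [hwin0, PySem.Dict.getD_counter]
      have hmem0 : ∀ b : Int, b ∈ (PySem.Dict.counter (bt.take w)).keys ↔ b ∈ (bt.drop (w - w)).take w := by
        intro b; rw [hwin0, PySem.Dict.keys_counter, PySem.Set.mem_ofList]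
      have hloop := cws_loop bt w hw1 (bt.length - w) w rfl le_rfl hwn
        (PySem.Dict.counter (bt.take w)) [((PySem.Dict.counter (bt.take w)).size : Int)]
        (PySem.Dict.nodup_keys_counter _) hcnt0 hmem0
      rw [hwin0] at hloop
      rw [hloop]
      have hsz : ((PySem.Dict.counter (bt.take w)).size : Int) = ((PySem.Set.ofList (bt.take w)).length : Int) := by
        rw [size_of_inv (PySem.Dict.counter (bt.take w)) (bt.take w) (PySem.Dict.nodup_keys_counter _)
          (fun b => by rw [PySem.Dict.keys_counter, PySem.Set.mem_ofList])]
      rw [hsz, reindex bt w hw1 hwn]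
      simp
  · subst htr; subst hws0
    norm_num [calculate_working_set, calculate_working_set_alt]
    simp [PySem.List.pyRange_one, PySem.List.slice, List.range_succ]
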